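-- pv_equiv track=rewrite | github.com/l-qmd/Skourrou | skourrouproject.py | compteDebutant
-- ===== SOURCE A (Python) =====
-- def compteDebutant(L):
--     """Fonction qui prend en paramètre une liste de bâton L et renvoie un dictionnaire,
-- indiquant le nombre de point et le nombre de baton de chaque type dans la liste"""
--     assert type(L) == list,"il faut que ça soit une liste s'il te plait"
--     compteur = 0
--     nombreG = 0
--     nombreM = 0
--     nombreP = 0
--     for k in L:
--         if k =="G":
--             compteur = compteur + 3
--             nombreG = nombreG + 1
--         elif k =="M":
--             compteur = compteur + 2
--             nombreM = nombreM + 1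
--         elif k =="P":
--             compteur = compteur + 1
--             nombreP = nombreP + 1
--         else:
--             compteur = compteur + 0
--     dicoliste ={"points": compteur,"G": nombreG, "M": nombreM, "P": nombreP}
--     return dicoliste
-- ===== SOURCE B (Python) =====
-- def compteDebutant(L):
--     """Fonction qui prend en paramètre une liste de bâton L et renvoie un dictionnaire,
-- indiquant le nombre de point et le nombre de baton de chaque type dans la liste"""
--     assert type(L) == list, "il faut que ça soit une liste s'il te plait"
--     nombreG = L.count("G")
--     nombreM = L.count("M")
--     nombreP = L.count("P")
--     return {"points": 3 * nombreG + 2 * nombreM + nombreP,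
--             "G": nombreG, "M": nombreM, "P": nombreP}
-- ===== Notes on version B (the rewrite author's own statement) =====
-- stated objective: simpler
-- what changed: Replaces the fused branching accumulator loop by three independent list.count scans plus a closed-form arithmetic combination for the points.
import Mathlib
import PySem

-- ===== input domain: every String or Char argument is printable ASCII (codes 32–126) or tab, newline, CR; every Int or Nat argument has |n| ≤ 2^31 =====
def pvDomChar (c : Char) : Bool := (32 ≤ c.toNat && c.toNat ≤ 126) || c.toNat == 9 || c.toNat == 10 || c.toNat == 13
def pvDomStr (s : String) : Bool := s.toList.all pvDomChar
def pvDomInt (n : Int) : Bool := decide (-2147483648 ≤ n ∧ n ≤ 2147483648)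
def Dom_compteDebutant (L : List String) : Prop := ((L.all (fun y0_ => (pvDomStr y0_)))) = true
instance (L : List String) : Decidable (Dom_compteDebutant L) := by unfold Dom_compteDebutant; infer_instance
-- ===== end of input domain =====

-- B replaces the fused branching loop by three independent counts plus a closed-form points formula (simpler).
-- ===== PORT A =====
def compteDebutant (L : List String) : List (String × Int) :=
  let s := L.foldl (fun (st : Int × Int × Int × Int) k =>
    let (compteur, nombreG, nombreM, nombreP) := st
    if k = "G" then (compteur + 3, nombreG + 1, nombreM, nombreP)
    else if k = "M" then (compteur + 2, nombreG, nombreM + 1, nombreP)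
    else if k = "P" then (compteur + 1, nombreG, nombreM, nombreP + 1)
    else (compteur + 0, nombreG, nombreM, nombreP)) (0, 0, 0, 0)
  [("points", s.1), ("G", s.2.1), ("M", s.2.2.1), ("P", s.2.2.2)]

-- ===== PORT B =====
def compteDebutant_alt (L : List String) : List (String × Int) :=
  let nombreG : Int := PySem.List.count L "G"
  let nombreM : Int := PySem.List.count L "M"
  let nombreP : Int := PySem.List.count L "P"
  [("points", 3 * nombreG + 2 * nombreM + nombreP),
   ("G", nombreG), ("M", nombreM), ("P", nombreP)]

-- ===== PRECONDITION & SPEC =====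
def Spec_compteDebutant (L : List String) (out : List (String × Int)) : Prop := out = compteDebutant_alt L
instance (L : List String) (out : List (String × Int)) : Decidable (Spec_compteDebutant L out) := by unfold Spec_compteDebutant; infer_instance

-- ===== CLAIM (what is proved, stated in full; the proofs are below) =====
def Claim_equal_compteDebutant : Prop := ∀ (L : List String), Dom_compteDebutant L → Spec_compteDebutant L (compteDebutant L)

-- ===== LEMMAS AND PROOFS =====

-- ===== VERDICT (by name: the statement is the Claim_ definition above) =====
theorem fold_state (L : List String) (c g m p : Int) :
    L.foldl (fun (st : Int × Int × Int × Int) k =>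
      let (compteur, nombreG, nombreM, nombreP) := st
      if k = "G" then (compteur + 3, nombreG + 1, nombreM, nombreP)
      else if k = "M" then (compteur + 2, nombreG, nombreM + 1, nombreP)
      else if k = "P" then (compteur + 1, nombreG, nombreM, nombreP + 1)
      else (compteur + 0, nombreG, nombreM, nombreP)) (c, g, m, p)
    = (c + 3 * PySem.List.count L "G" + 2 * PySem.List.count L "M" + PySem.List.count L "P",
       g + PySem.List.count L "G", m + PySem.List.count L "M", p + PySem.List.count L "P") := by
  induction L generalizing c g m p with
  | nil => simp [PySem.List.count]
  | cons x xs ih =>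
    simp only [List.foldl_cons]
    by_cases hG : x = "G"
    · subst hG; rw [ih]; simp [PySem.List.count]; ring_nf; simp
    · by_cases hM : x = "M"
      · subst hM; rw [if_neg (by simp), ih]; simp [PySem.List.count]; ring_nf; simp
      · by_cases hP : x = "P"
        · subst hP; rw [if_neg (by simp), if_neg (by simp), ih]
          simp [PySem.List.count]; ring_nf; simp
        · rw [if_neg hG, if_neg hM, if_neg hP, ih]
          simp [PySem.List.count, hG, hM, hP]

theorem compteDebutant_spec : Claim_equal_compteDebutant := by
  intro L _
  unfold Spec_compteDebutant compteDebutant compteDebutant_alt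
  rw [fold_state]
  simp
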